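-- pv_equiv track=rewrite | github.com/LucaChioni/OffToSleep | GenericFuncA.py | getVitaTotRallo
-- ===== SOURCE A (Python) =====
-- def getVitaTotRallo(livello, guanti):
--     pvtot = 50
--     if guanti == 1:
--         pvtot += 50
--     if livello >= 1:
--         i = 1
--         while i <= 100:
--             if livello <= i + 2:
--                 pvtot += (i * 5)
--                 break
--             i += 3
--     return pvtot
-- ===== SOURCE B (Python) =====
-- def getVitaTotRallo(livello, guanti):
--     pvtot = 50 + (50 if guanti == 1 else 0)
--     if 1 <= livello <= 102:
--         pvtot += 5 * int(1 + 3 * ((livello - 1) // 3))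
--     return pvtot
-- ===== Notes on version B (the rewrite author's own statement) =====
-- stated objective: simpler
-- what changed: Replaces the while loop scanning buckets i=1,4,...,100 with a closed-form bucket index 1+3*((livello-1)//3) added only when 1 <= livello <= 102.
import Mathlib
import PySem

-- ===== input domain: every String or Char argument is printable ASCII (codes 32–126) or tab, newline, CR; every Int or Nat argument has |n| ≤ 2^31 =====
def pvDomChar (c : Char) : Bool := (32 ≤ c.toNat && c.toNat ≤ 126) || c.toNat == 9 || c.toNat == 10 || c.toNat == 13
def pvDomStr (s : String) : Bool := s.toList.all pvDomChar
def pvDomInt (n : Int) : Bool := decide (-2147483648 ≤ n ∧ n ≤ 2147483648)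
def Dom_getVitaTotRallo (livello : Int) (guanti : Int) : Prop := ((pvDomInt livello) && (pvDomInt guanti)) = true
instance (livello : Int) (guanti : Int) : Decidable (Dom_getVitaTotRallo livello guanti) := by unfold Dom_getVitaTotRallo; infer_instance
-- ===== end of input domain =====

-- B replaces A's bucket-scanning while loop with a closed-form bucket index (simpler, O(1)).

-- ===== PORT A =====
-- the while loop: i starts at 1 and steps by 3 while i ≤ 100; 40 fuel steps cover all ≤ 34 iterations
def getVitaTotRalloLoop (livello : Int) (i : Int) : Nat → Int
  | 0 => 0
  | fuel + 1 =>
    if i ≤ 100 then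
      if livello ≤ i + 2 then i * 5
      else getVitaTotRalloLoop livello (i + 3) fuel
    else 0

def getVitaTotRallo (livello : Int) (guanti : Int) : Int :=
  let pvtot : Int := 50
  let pvtot := if guanti = 1 then pvtot + 50 else pvtot
  if livello ≥ 1 then pvtot + getVitaTotRalloLoop livello 1 40 else pvtot

-- ===== PORT B =====
def getVitaTotRallo_alt (livello : Int) (guanti : Int) : Int :=
  let pvtot : Int := 50 + (if guanti = 1 then 50 else 0)
  if 1 ≤ livello ∧ livello ≤ 102 then
    pvtot + 5 * (1 + 3 * (PySem.Int.floordiv (livello - 1) 3))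
  else pvtot

-- ===== PRECONDITION & SPEC =====
def Spec_getVitaTotRallo (livello : Int) (guanti : Int) (out : Int) : Prop := out = getVitaTotRallo_alt livello guanti
instance (livello : Int) (guanti : Int) (out : Int) : Decidable (Spec_getVitaTotRallo livello guanti out) := by unfold Spec_getVitaTotRallo; infer_instance

-- ===== CLAIM (what is proved, stated in full; the proofs are below) =====
def Claim_equal_getVitaTotRallo : Prop := ∀ (livello : Int) (guanti : Int), Dom_getVitaTotRallo livello guanti → Spec_getVitaTotRallo livello guanti (getVitaTotRallo livello guanti)

-- ===== LEMMAS AND PROOFS =====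

-- when livello is beyond the last bucket, the loop never breaks and contributes 0
theorem loop_big (livello : Int) (h : 102 < livello) :
    ∀ (fuel : Nat) (i : Int), getVitaTotRalloLoop livello i fuel = 0 := by
  intro fuel
  induction fuel with
  | zero => intro i; rfl
  | succ n ih =>
    intro i
    simp only [getVitaTotRalloLoop]
    by_cases hi : i ≤ 100
    · rw [if_pos hi, if_neg (by omega), ih]
    · rw [if_neg hi]

-- inside the covered range the loop equals the closed-form bucket value (finite check)
theorem loop_small (livello : Int) (h1 : 1 ≤ livello) (h2 : livello ≤ 102) :
    getVitaTotRalloLoop livello 1 40 = 5 * (1 + 3 * (PySem.Int.floordiv (livello - 1) 3)) := by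
  interval_cases livello <;> decide

-- ===== VERDICT (by name: the statement is the Claim_ definition above) =====
theorem getVitaTotRallo_spec : Claim_equal_getVitaTotRallo := by
  intro livello guanti _
  unfold Spec_getVitaTotRallo getVitaTotRallo getVitaTotRallo_alt
  by_cases h1 : livello ≥ 1
  · by_cases h2 : livello ≤ 102
    · have hb : (1 ≤ livello ∧ livello ≤ 102) := ⟨h1, h2⟩
      simp only [if_pos h1, if_pos hb, loop_small livello h1 h2]
      by_cases hg : guanti = 1 <;> simp [hg] <;> ring
    · have hb : ¬(1 ≤ livello ∧ livello ≤ 102) := by omega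
      simp only [if_pos h1, if_neg hb, loop_big livello (by omega)]
      by_cases hg : guanti = 1 <;> simp [hg]
  · have hb : ¬(1 ≤ livello ∧ livello ≤ 102) := by omega
    by_cases hg : guanti = 1 <;> simp [h1, hb, hg]
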